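-- pv_equiv track=rewrite | github.com/brownbreeze/StudyCodingTest | programmers/2_n^2_배열_자르기/source_20221121.py | solution
-- ===== SOURCE A (Python) =====
-- def solution(n, left, right):
--     answer = []
--     for j in range(int(left/n), n):
--         for i in range(n):
--             if j*n+i < left : continue
--             if j*n+i > right: return answer
--             answer.append(j+1 if i < j else i+1)
--     return answer
-- ===== SOURCE B (Python) =====
-- def solution(n, left, right):
--     if n < 1:
--         return []
--     return [max(k // n, k % n) + 1 for k in range(left, right + 1)]
-- ===== Notes on version B (the rewrite author's own statement) =====
-- stated objective: simpler
-- what changed: Replaces the nested row/column loops with continue-skip and early return by a single comprehension over the flat indices left..right, computing each value directly as max(k//n, k%n)+1.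
-- outside the precondition, e.g. on solution(3, -4, 5): A returns [1, 2, 3, 1, 2, 3, 2, 2, 3], B returns [3, 1, 2, 3, 1, 2, 3, 2, 2, 3]; on solution(2, 1, 10): A returns [2, 2, 2], B returns [2, 2, 2, 3, 3, 4, 4, 5, 5, 6]
import Mathlib
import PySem

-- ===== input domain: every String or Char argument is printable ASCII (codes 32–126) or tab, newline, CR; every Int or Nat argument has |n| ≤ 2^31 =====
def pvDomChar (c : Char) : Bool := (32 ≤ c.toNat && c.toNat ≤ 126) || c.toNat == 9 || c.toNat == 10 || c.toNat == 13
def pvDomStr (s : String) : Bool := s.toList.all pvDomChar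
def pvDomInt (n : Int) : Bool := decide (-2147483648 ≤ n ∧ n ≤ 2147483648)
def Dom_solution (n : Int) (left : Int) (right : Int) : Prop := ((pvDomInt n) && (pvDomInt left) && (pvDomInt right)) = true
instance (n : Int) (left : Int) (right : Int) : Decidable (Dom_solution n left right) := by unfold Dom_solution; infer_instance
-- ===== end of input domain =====

-- B replaces A's nested row/column loops (with continue-skip and early return) by one
-- direct map over the flat indices left..right (objective: simpler).


-- ===== PORT A =====
-- inner 'for i in range(n)' loop, i counting up from 0; Bool = True means the early
-- 'return answer' fired (the range is consumed lazily, as Python's range is)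
def solA_inner (n left right j i : Int) (acc : List Int) : List Int × Bool :=
  if i < n then
    if j * n + i < left then solA_inner n left right j (i + 1) acc
    else if j * n + i > right then (acc, true)
    else solA_inner n left right j (i + 1) (acc ++ [if i < j then j + 1 else i + 1])
  else (acc, false)
termination_by (n - i).toNat
decreasing_by all_goals omega

-- outer 'for j in range(int(left/n), n)' loop, j counting up
def solA_outer (n left right j : Int) (acc : List Int) : List Int :=
  if j < n then
    match solA_inner n left right j 0 acc with
    | (acc', true) => acc'
    | (acc', false) => solA_outer n left right (j + 1) acc'
  else acc
termination_by (n - j).toNat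
decreasing_by omega

-- int(left/n) truncates toward zero = Int.tdiv; exact on Dom (|left|, |n| ≤ 2^31 keeps the
-- float quotient within 2^-21 of the exact value, so truncation is unaffected)
def solution (n : Int) (left : Int) (right : Int) : List Int :=
  solA_outer n left right (Int.tdiv left n) []

-- ===== PORT B =====
def solution_alt (n : Int) (left : Int) (right : Int) : List Int :=
  if n < 1 then []
  else (PySem.List.pyRange left (right + 1) 1).map
    (fun k => max (PySem.Int.floordiv k n) (PySem.Int.mod k n) + 1)

-- ===== PRECONDITION & SPEC =====
-- Pre_ admits every negative n (both programs return []) and, for positive n, the task's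
-- natural domain (an n×n array sliced at flat indices left..right).  It excludes n = 0,
-- where A raises ZeroDivisionError, and, for positive n, inputs with left < 0 or
-- right ≥ n², where A's extra/truncated elements are accidents of its truncating
-- start row int(left/n) and its early return rather than anything a caller would specify.
def Pre_solution (n : Int) (left : Int) (right : Int) : Prop :=
  n ≤ -1 ∨ (1 ≤ n ∧ 0 ≤ left ∧ right < n * n)
instance (n : Int) (left : Int) (right : Int) : Decidable (Pre_solution n left right) := by
  unfold Pre_solution; infer_instance

def pvWitness_solution : Int × Int × Int := (3, 2, 5)

def Spec_solution (n : Int) (left : Int) (right : Int) (out : List Int) : Prop :=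
  out = solution_alt n left right
instance (n : Int) (left : Int) (right : Int) (out : List Int) : Decidable (Spec_solution n left right out) := by
  unfold Spec_solution; infer_instance

-- ===== CLAIM (what is proved, stated in full; the proofs are below) =====
def Claim_equal_solution : Prop := ∀ (n : Int) (left : Int) (right : Int),
  Dom_solution n left right → Pre_solution n left right →
  Spec_solution n left right (solution n left right)

-- ===== LEMMAS AND PROOFS =====

-- the per-element value B computes
def gval (n k : Int) : Int := max (PySem.Int.floordiv k n) (PySem.Int.mod k n) + 1

-- A's combined loop body viewed as a single scan over flat indices
def scan (n left right : Int) : List Int → List Int → List Int × Bool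
  | [], acc => (acc, false)
  | k :: ks, acc =>
    if k < left then scan n left right ks acc
    else if k > right then (acc, true)
    else scan n left right ks (acc ++ [gval n k])

theorem scan_append (n left right : Int) (ks1 ks2 acc : List Int) :
    scan n left right (ks1 ++ ks2) acc =
      (if (scan n left right ks1 acc).2 then scan n left right ks1 acc
       else scan n left right ks2 (scan n left right ks1 acc).1) := by
  induction ks1 generalizing acc with
  | nil => simp [scan]
  | cons k ks ih =>
    by_cases h1 : k < left
    · simp only [List.cons_append, scan, if_pos h1]; exact ih acc
    · by_cases h2 : k > right
      · simp [List.cons_append, scan, if_neg h1, if_pos h2]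
      · simp only [List.cons_append, scan, if_neg h1, if_neg h2]; exact ih _

theorem inner_scan (n left right j : Int) (hn : 1 ≤ n) (t : Int) (acc : List Int)
    (ht : 0 ≤ t) :
    solA_inner n left right j t acc =
      scan n left right (PySem.List.pyRange (j * n + t) (j * n + n) 1) acc := by
  by_cases h : t < n
  · rw [PySem.List.pyRange_one_cons (by omega : j * n + t < j * n + n)]
    have hval : (if t < j then j + 1 else t + 1) = gval n (j * n + t) := by
      have hfd : PySem.Int.floordiv (j * n + t) n = j := by
        rw [PySem.Int.floordiv_eq_iff_of_pos (by omega)]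
        constructor <;> nlinarith
      have hmod : PySem.Int.mod (j * n + t) n = t := by
        have := PySem.Int.floordiv_mul_add_mod (j * n + t) n
        rw [hfd] at this; omega
      simp only [gval, hfd, hmod]
      rcases lt_or_ge t j with h' | h'
      · rw [if_pos h', max_eq_left (by omega)]
      · rw [if_neg (by omega), max_eq_right h']
    have harith : j * n + t + 1 = j * n + (t + 1) := by ring
    have ih := inner_scan n left right j hn (t + 1)
    rw [solA_inner, if_pos h]
    simp only [scan, hval, harith]
    split_ifs with h1 h2
    · exact ih acc (by omega)
    · rfl
    · exact ih _ (by omega)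
  · rw [solA_inner, if_neg h,
        PySem.List.pyRange_one_eq_nil (by omega : j * n + n ≤ j * n + t)]
    rfl
termination_by (n - t).toNat
decreasing_by omega

theorem outer_scan (n left right : Int) (hn : 1 ≤ n) (j : Int) (acc : List Int) :
    solA_outer n left right j acc =
      (scan n left right (PySem.List.pyRange (j * n) (n * n) 1) acc).1 := by
  by_cases h : j < n
  · have hsplit : PySem.List.pyRange (j * n) (n * n) 1 =
        PySem.List.pyRange (j * n) (j * n + n) 1 ++ PySem.List.pyRange (j * n + n) (n * n) 1 :=
      PySem.List.pyRange_one_append _ _ _ (by omega) (by nlinarith)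
    have hz : j * n + 0 = j * n := by ring
    rw [solA_outer, if_pos h]
    rw [inner_scan n left right j hn 0 acc (le_refl 0), hz, hsplit, scan_append]
    rcases hsc : scan n left right (PySem.List.pyRange (j * n) (j * n + n) 1) acc with ⟨acc', fl⟩
    cases fl with
    | true => simp
    | false =>
      have ih := outer_scan n left right hn (j + 1) acc'
      have harith : (j + 1) * n = j * n + n := by ring
      rw [harith] at ih
      simpa using ih
  · rw [solA_outer, if_neg h,
        PySem.List.pyRange_one_eq_nil (by nlinarith : n * n ≤ j * n)]
    rfl
termination_by (n - j).toNat
decreasing_by omega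

-- emitting phase: once past left, the scan copies values until right (or the end)
theorem scan_emit (n left right a b : Int) (acc : List Int)
    (hla : left ≤ a) (hrb : right + 1 ≤ b) :
    (scan n left right (PySem.List.pyRange a b 1) acc).1 =
      acc ++ (PySem.List.pyRange a (right + 1) 1).map (gval n) := by
  by_cases h : a < b
  · rw [PySem.List.pyRange_one_cons h]
    simp only [scan, if_neg (by omega : ¬ a < left)]
    by_cases hr : a > right
    · rw [if_pos hr, PySem.List.pyRange_one_eq_nil (by omega)]; simp
    · rw [if_neg hr, scan_emit n left right (a + 1) b _ (by omega) hrb,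
          PySem.List.pyRange_one_cons (by omega : a < right + 1)]
      simp
  · rw [PySem.List.pyRange_one_eq_nil (by omega),
        PySem.List.pyRange_one_eq_nil (by omega : right + 1 ≤ a)]
    simp [scan]
termination_by (b - a).toNat
decreasing_by omega

-- skipping phase: indices below left contribute nothing
theorem scan_full (n left right a b : Int) (acc : List Int)
    (hal : a ≤ left) (hrb : right + 1 ≤ b) :
    (scan n left right (PySem.List.pyRange a b 1) acc).1 =
      acc ++ (PySem.List.pyRange left (right + 1) 1).map (gval n) := by
  by_cases h : a < b
  · by_cases hskip : a < left
    · rw [PySem.List.pyRange_one_cons h]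
      simp only [scan, if_pos hskip]
      exact scan_full n left right (a + 1) b acc (by omega) hrb
    · have ha : a = left := by omega
      rw [ha]
      exact scan_emit n left right left b acc (le_refl _) hrb
  · rw [PySem.List.pyRange_one_eq_nil (by omega),
        PySem.List.pyRange_one_eq_nil (by omega : right + 1 ≤ left)]
    simp [scan]
termination_by (b - a).toNat
decreasing_by omega

-- for n ≤ 0 the inner range is empty, so the outer loop only threads acc through
theorem outer_nonpos (n left right : Int) (hn : n ≤ 0) (j : Int) (acc : List Int) :
    solA_outer n left right j acc = acc := by
  by_cases h : j < n
  · rw [solA_outer, if_pos h, solA_inner, if_neg (by omega : ¬ (0:Int) < n)]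
    exact outer_nonpos n left right hn (j + 1) acc
  · rw [solA_outer, if_neg h]
termination_by (n - j).toNat
decreasing_by omega

-- ===== VERDICT (by name: the statement is the Claim_ definition above) =====
theorem solution_spec : Claim_equal_solution := by
  intro n left right _hdom hpre
  rcases hpre with hneg | ⟨hn, hleft, hright⟩
  · unfold Spec_solution solution solution_alt
    rw [outer_nonpos n left right (by omega) _ [], if_pos (by omega)]
  · unfold Spec_solution solution solution_alt
    rw [if_neg (by omega)]
    have hj0n : Int.tdiv left n * n ≤ left := by
      rw [Int.tdiv_eq_ediv_of_nonneg hleft]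
      exact Int.ediv_mul_le left (by omega)
    rw [outer_scan n left right hn (Int.tdiv left n) [],
        scan_full n left right (Int.tdiv left n * n) (n * n) [] hj0n (by omega)]
    simp [gval]
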